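-- pv_equiv track=rewrite | github.com/filesfor/CLI-Dungeon | linux_emulator.py | _parse_redirection
-- ===== SOURCE A (Python) =====
-- def _parse_redirection(line: str):
--     """
--     Return (cmd_part, op, filename) for the LAST unquoted > or >> in the
--     line, or None if there is none.
--     """
--     in_single = in_double = False
--     tagged = []
--     for c in line:
--         if   c == "'" and not in_double: in_single = not in_single
--         elif c == '"' and not in_single: in_double = not in_double
--         tagged.append((c, in_single or in_double))
--
--     result = None
--     i = 0
--     while i < len(tagged):
--         c, quoted = tagged[i]
--         if not quoted and c == '>':
--             if i + 1 < len(tagged) and tagged[i+1][0] == '>' and not tagged[i+1][1]: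
--                 op   = '>>'
--                 rest = ''.join(ch for ch, _ in tagged[i+2:]).strip()
--                 cmd  = ''.join(ch for ch, _ in tagged[:i]).strip()
--                 result = (cmd, op, rest.split()[0] if rest.split() else '')
--                 i += 2
--             else:
--                 op   = '>'
--                 rest = ''.join(ch for ch, _ in tagged[i+1:]).strip()
--                 cmd  = ''.join(ch for ch, _ in tagged[:i]).strip()
--                 result = (cmd, op, rest.split()[0] if rest.split() else '')
--                 i += 1
--         else:
--             i += 1
--     return result
-- ===== SOURCE B (Python) =====
-- def _parse_redirection(line: str):
--     """
--     Return (cmd_part, op, filename) for the LAST unquoted > or >> in the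
--     line, or None if there is none.
--     """
--     in_single = in_double = False
--     op_at = -1
--     op_len = 0
--     i = 0
--     n = len(line)
--     while i < n:
--         c = line[i]
--         if c == "'" and not in_double:
--             in_single = not in_single
--         elif c == '"' and not in_single:
--             in_double = not in_double
--         elif c == '>' and not (in_single or in_double):
--             op_at = i
--             op_len = 2 if i + 1 < n and line[i + 1] == '>' else 1
--             i += op_len
--             continue
--         i += 1
--     if op_at < 0:
--         return None
--     cmd = line[:op_at].strip()
--     rest = line[op_at + op_len:].strip()
--     parts = rest.split()
--     return (cmd, '>' if op_len == 1 else '>>', parts[0] if parts else '')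
-- ===== Notes on version B (the rewrite author's own statement) =====
-- stated objective: faster
-- what changed: Instead of building a tagged (char, quoted) list and re-joining and re-stripping the whole line at every redirection operator found, B does one quote-tracking scan that only records the position and length of the last unquoted >/>>, then builds cmd/op/filename once at the end.
import Mathlib
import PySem

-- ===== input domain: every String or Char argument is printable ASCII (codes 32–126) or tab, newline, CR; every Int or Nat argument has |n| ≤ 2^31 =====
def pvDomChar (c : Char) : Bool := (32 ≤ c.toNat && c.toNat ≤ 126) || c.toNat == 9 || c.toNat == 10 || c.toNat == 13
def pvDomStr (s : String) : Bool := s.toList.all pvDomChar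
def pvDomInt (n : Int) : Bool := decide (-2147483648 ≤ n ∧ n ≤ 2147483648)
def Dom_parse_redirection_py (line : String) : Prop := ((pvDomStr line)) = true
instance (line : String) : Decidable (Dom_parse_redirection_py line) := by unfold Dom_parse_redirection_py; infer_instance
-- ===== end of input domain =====

-- B replaces A's tagged-list build plus repeated full-string joins at every operator by a
-- single quote-tracking scan that only records the last operator's position, building the
-- result strings once at the end (objective: faster, O(n) instead of O(n^2)).

-- ===== PORT A =====
-- tagging loop: for c in line: toggle quote flags, append (c, in_single or in_double)
def pvTagA : List Char → Bool → Bool → List (Char × Bool)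
  | [], _, _ => []
  | c :: cs, s, d =>
    if c == '\'' && !d then (c, (!s) || d) :: pvTagA cs (!s) d
    else if c == '"' && !s then (c, s || (!d)) :: pvTagA cs s (!d)
    else (c, s || d) :: pvTagA cs s d

-- while i < len(tagged): … (result overwritten at each unquoted > / >>)
def pvScanA (tagged : List (Char × Bool)) (i : Nat) (result : Option (List String)) :
    Option (List String) :=
  if h : i < tagged.length then
    let c := tagged[i].1
    let quoted := tagged[i].2
    if !quoted && (c == '>') then
      if (tagged[i+1]?).any (fun p => p.1 == '>' && !p.2) then
        let rest := PySem.Str.strip (String.ofList ((tagged.drop (i+2)).map Prod.fst))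
        let cmd := PySem.Str.strip (String.ofList ((tagged.take i).map Prod.fst))
        let parts := PySem.Str.split₀ rest
        pvScanA tagged (i+2)
          (some [cmd, ">>", match parts with | [] => "" | w :: _ => w])
      else
        let rest := PySem.Str.strip (String.ofList ((tagged.drop (i+1)).map Prod.fst))
        let cmd := PySem.Str.strip (String.ofList ((tagged.take i).map Prod.fst))
        let parts := PySem.Str.split₀ rest
        pvScanA tagged (i+1)
          (some [cmd, ">", match parts with | [] => "" | w :: _ => w])
    else pvScanA tagged (i+1) result
  else result
termination_by tagged.length - i

def parse_redirection_py (line : String) : Option (List String) :=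
  pvScanA (pvTagA line.toList false false) 0 none

-- ===== PORT B =====
-- one scan: track quote state, remember (position, length) of the last unquoted > / >>
def pvScanB (cs : List Char) (i : Nat) (s d : Bool) (best : Option (Nat × Nat)) :
    Option (Nat × Nat) :=
  if h : i < cs.length then
    let c := cs[i]
    if c == '\'' && !d then pvScanB cs (i+1) (!s) d best
    else if c == '"' && !s then pvScanB cs (i+1) s (!d) best
    else if c == '>' && !(s || d) then
      let l : Nat := if (cs[i+1]?).any (· == '>') then 2 else 1
      pvScanB cs (i+l) s d (some (i, l))
    else pvScanB cs (i+1) s d best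
  else best
termination_by cs.length - i
decreasing_by all_goals (first | omega | (split <;> omega))

-- build the three result strings once, from the recorded operator
def pvRenderB (cs : List Char) : Option (Nat × Nat) → Option (List String)
  | none => none
  | some (p, l) =>
    let cmd := PySem.Str.strip (String.ofList (cs.take p))
    let rest := PySem.Str.strip (String.ofList (cs.drop (p + l)))
    let parts := PySem.Str.split₀ rest
    some [cmd, if l == 1 then ">" else ">>", match parts with | [] => "" | w :: _ => w]

def parse_redirection_py_alt (line : String) : Option (List String) :=
  pvRenderB line.toList (pvScanB line.toList 0 false false none)

-- ===== PRECONDITION & SPEC =====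
def Spec_parse_redirection_py (line : String) (out : Option (List String)) : Prop := out = parse_redirection_py_alt line
instance (line : String) (out : Option (List String)) : Decidable (Spec_parse_redirection_py line out) := by unfold Spec_parse_redirection_py; infer_instance

-- ===== CLAIM (what is proved, stated in full; the proofs are below) =====
def Claim_equal_parse_redirection_py : Prop := ∀ (line : String), Dom_parse_redirection_py line → Spec_parse_redirection_py line (parse_redirection_py line)

-- ===== LEMMAS AND PROOFS =====

lemma pvTagA_fst : ∀ (cs : List Char) (s d : Bool), (pvTagA cs s d).map Prod.fst = cs := by
  intro cs
  induction cs with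
  | nil => intro s d; simp [pvTagA]
  | cons c cs ih =>
    intro s d
    simp only [pvTagA]
    split_ifs <;> simp [ih]

lemma pvTagA_length (cs : List Char) (s d : Bool) : (pvTagA cs s d).length = cs.length := by
  have := congrArg List.length (pvTagA_fst cs s d)
  simpa using this

lemma pvTagA_head_fst (c : Char) (cs : List Char) (s d : Bool) :
    ∃ q rest, pvTagA (c :: cs) s d = (c, q) :: rest := by
  simp only [pvTagA]; split_ifs <;> exact ⟨_, _, rfl⟩

lemma pv_key (cs : List Char) (s0 d0 : Bool) :
    ∀ n i s d best, cs.length - i ≤ n →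
      pvTagA (cs.drop i) s d = (pvTagA cs s0 d0).drop i →
      pvScanA (pvTagA cs s0 d0) i (pvRenderB cs best) =
        pvRenderB cs (pvScanB cs i s d best) := by
  have hlen : (pvTagA cs s0 d0).length = cs.length := pvTagA_length cs s0 d0
  intro n
  induction n with
  | zero =>
    intro i s d best hn _
    have hi : ¬ i < cs.length := by omega
    rw [pvScanA.eq_def, pvScanB.eq_def, dif_neg (by omega : ¬ i < (pvTagA cs s0 d0).length),
      dif_neg hi]
  | succ n ih =>
    intro i s d best hn htag
    by_cases hi : i < cs.length
    · have hiT : i < (pvTagA cs s0 d0).length := by omega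
      rw [List.drop_eq_getElem_cons hi, List.drop_eq_getElem_cons hiT] at htag
      simp only [pvTagA] at htag
      rw [pvScanA.eq_def, pvScanB.eq_def, dif_pos hiT, dif_pos hi]
      by_cases e1 : (cs[i] == '\'' && !d) = true
      · -- single-quote toggle: A records a tag and skips, B toggles s
        rw [if_pos e1, List.cons.injEq] at htag
        obtain ⟨hTi, htag'⟩ := htag
        have hc : cs[i] = '\'' := by
          rcases Bool.and_eq_true .. |>.mp e1 with ⟨h1, _⟩; exact beq_iff_eq.mp h1
        have gA : (!(pvTagA cs s0 d0)[i].2 && ((pvTagA cs s0 d0)[i].1 == '>')) = false := by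
          rw [← hTi]; simp [hc]
        rw [if_pos e1, if_neg (by simp [gA])]
        exact ih (i+1) (!s) d best (by omega) htag'
      · by_cases e2 : (cs[i] == '"' && !s) = true
        · -- double-quote toggle
          rw [if_neg e1, if_pos e2, List.cons.injEq] at htag
          obtain ⟨hTi, htag'⟩ := htag
          have hc : cs[i] = '"' := by
            rcases Bool.and_eq_true .. |>.mp e2 with ⟨h1, _⟩; exact beq_iff_eq.mp h1
          have gA : (!(pvTagA cs s0 d0)[i].2 && ((pvTagA cs s0 d0)[i].1 == '>')) = false := by
            rw [← hTi]; simp [hc]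
          rw [if_neg e1, if_pos e2, if_neg (by simp [gA])]
          exact ih (i+1) s (!d) best (by omega) htag'
        · by_cases e3 : (cs[i] == '>' && !(s || d)) = true
          · -- unquoted redirection operator
            rw [if_neg e1, if_neg e2, List.cons.injEq] at htag
            obtain ⟨hTi, htag'⟩ := htag
            obtain ⟨hc, hsd⟩ := Bool.and_eq_true .. |>.mp e3
            have hc : cs[i] = '>' := beq_iff_eq.mp hc
            have hsd : (s || d) = false := by simpa using hsd
            have gA : (!(pvTagA cs s0 d0)[i].2 && ((pvTagA cs s0 d0)[i].1 == '>')) = true := by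
              rw [← hTi]; simp [hc, hsd]
            rw [if_neg e1, if_neg e2, if_pos e3, if_pos gA]
            by_cases hi1 : i + 1 < cs.length
            · have hiT1 : i + 1 < (pvTagA cs s0 d0).length := by omega
              have htagKeep := htag'
              rw [List.drop_eq_getElem_cons hi1, List.drop_eq_getElem_cons hiT1] at htag'
              by_cases hgt : cs[i+1] = '>'
              · -- ">>": both take the two-char operator
                have e1' : ¬ (cs[i+1] == '\'' && !d) = true := by simp [hgt]
                have e2' : ¬ (cs[i+1] == '"' && !s) = true := by simp [hgt]
                simp only [pvTagA] at htag'
                rw [if_neg e1', if_neg e2', List.cons.injEq] at htag'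
                obtain ⟨hTi1, htag''⟩ := htag'
                have gIn : (((pvTagA cs s0 d0)[i+1]?).any fun p => p.1 == '>' && !p.2) = true := by
                  rw [List.getElem?_eq_getElem hiT1]
                  simp only [Option.any_some]
                  rw [← hTi1]; simp [hgt, hsd]
                have gInB : ((cs[i+1]?).any (· == '>')) = true := by
                  rw [List.getElem?_eq_getElem hi1]; simp [hgt]
                rw [if_pos gIn]
                simp only [gInB, if_true]
                have hres : (some [PySem.Str.strip (String.ofList
                      (((pvTagA cs s0 d0).take i).map Prod.fst)), ">>",
                      match PySem.Str.split₀ (PySem.Str.strip (String.ofList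
                        (((pvTagA cs s0 d0).drop (i+2)).map Prod.fst))) with
                      | [] => "" | w :: _ => w] : Option (List String)) =
                    pvRenderB cs (some (i, 2)) := by
                  simp [pvRenderB, List.map_take, List.map_drop, pvTagA_fst]
                rw [hres]
                exact ih (i+2) s d (some (i, 2)) (by omega) htag''
              · -- single ">": next char exists but is not '>'
                obtain ⟨q, rest, hq⟩ := pvTagA_head_fst cs[i+1] (cs.drop (i+2)) s d
                rw [hq, List.cons.injEq] at htag'
                obtain ⟨hTi1, -⟩ := htag'
                have gIn : (((pvTagA cs s0 d0)[i+1]?).any fun p => p.1 == '>' && !p.2) = false := by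
                  rw [List.getElem?_eq_getElem hiT1]
                  simp only [Option.any_some]
                  rw [← hTi1]; simp [hgt]
                have gInB : ((cs[i+1]?).any (· == '>')) = false := by
                  rw [List.getElem?_eq_getElem hi1]; simp [hgt]
                rw [if_neg (by simp [gIn])]
                simp only [gInB]
                have hres : (some [PySem.Str.strip (String.ofList
                      (((pvTagA cs s0 d0).take i).map Prod.fst)), ">",
                      match PySem.Str.split₀ (PySem.Str.strip (String.ofList
                        (((pvTagA cs s0 d0).drop (i+1)).map Prod.fst))) with
                      | [] => "" | w :: _ => w] : Option (List String)) =
                    pvRenderB cs (some (i, 1)) := by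
                  simp [pvRenderB, List.map_take, List.map_drop, pvTagA_fst]
                rw [hres]
                exact ih (i+1) s d (some (i, 1)) (by omega) htagKeep
            · -- the operator is the last character
              have gIn : (((pvTagA cs s0 d0)[i+1]?).any fun p => p.1 == '>' && !p.2) = false := by
                rw [List.getElem?_eq_none (by omega)]; rfl
              have gInB : ((cs[i+1]?).any (· == '>')) = false := by
                rw [List.getElem?_eq_none (by omega)]; rfl
              rw [if_neg (by simp [gIn])]
              simp only [gInB]
              have hres : (some [PySem.Str.strip (String.ofList
                    (((pvTagA cs s0 d0).take i).map Prod.fst)), ">",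
                    match PySem.Str.split₀ (PySem.Str.strip (String.ofList
                      (((pvTagA cs s0 d0).drop (i+1)).map Prod.fst))) with
                    | [] => "" | w :: _ => w] : Option (List String)) =
                  pvRenderB cs (some (i, 1)) := by
                simp [pvRenderB, List.map_take, List.map_drop, pvTagA_fst]
              rw [hres]
              exact ih (i+1) s d (some (i, 1)) (by omega) htag'
          · -- ordinary character (or a quoted quote/operator): both just advance
            rw [if_neg e1, if_neg e2, List.cons.injEq] at htag
            obtain ⟨hTi, htag'⟩ := htag
            have gA : (!(pvTagA cs s0 d0)[i].2 && ((pvTagA cs s0 d0)[i].1 == '>')) = false := by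
              rw [← hTi]
              have := eq_false_of_ne_true e3
              rw [Bool.and_comm]; exact this
            rw [if_neg e1, if_neg e2, if_neg e3, if_neg (by simp [gA])]
            exact ih (i+1) s d best (by omega) htag'
    · rw [pvScanA.eq_def, pvScanB.eq_def, dif_neg (by omega : ¬ i < (pvTagA cs s0 d0).length),
        dif_neg hi]

-- ===== VERDICT (by name: the statement is the Claim_ definition above) =====
theorem parse_redirection_py_spec : Claim_equal_parse_redirection_py := by
  intro line _
  unfold Spec_parse_redirection_py parse_redirection_py parse_redirection_py_alt
  have h := pv_key line.toList false false line.toList.length 0 false false none (by omega)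
    (by simp)
  simpa [pvRenderB] using h
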